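-- pv_equiv track=rewrite | github.com/jij3x/SolutionJudger | evaluate.py | binarytreevector_filter
-- ===== SOURCE A (Python) =====
-- def binarytree_filter(line):
--     tree = line[1:-1].split(",")
--     filtered = []
--     f = 0
--     for n in tree:
--         if n != "#":
--             if f == 1:
--                 filtered.append(n)
--             f ^= 1
--         else:
--             f = 0
--             filtered.append(n)
--
--     return "[{}]".format(",".join(filtered))
--
-- def binarytreevector_filter(line):
--     if line == "[]":
--         return line
--
--     trees = line[1:-1].split("],[")
--     for i in range(len(trees)):
--         trees[i] = ("" if trees[i].startswith("[") else "[") + trees[i] + ("" if trees[i].endswith("]") else "]")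
--         trees[i] = binarytree_filter(trees[i])
--
--     return "[{}]".format(",".join(trees))
-- ===== SOURCE B (Python) =====
-- def binarytreevector_filter(line):
--     if line == "[]":
--         return line
--     out = []
--     for t in line[1:-1].split("],["):
--         body = t[1:] if t.startswith("[") else t
--         if body.endswith("]"):
--             body = body[:-1]
--         ts = body.split(",")
--         kept = []
--         i = 0
--         while i < len(ts):
--             if ts[i] == "#":
--                 kept.append("#")
--                 i += 1
--             elif i + 1 < len(ts) and ts[i + 1] != "#":
--                 kept.append(ts[i + 1])
--                 i += 2
--             else:
--                 i += 1
--         out.append("[" + ",".join(kept) + "]")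
--     return "[" + ",".join(out) + "]"
-- ===== Notes on version B (the rewrite author's own statement) =====
-- stated objective: alternative
-- what changed: B is one flat function that strips brackets conditionally instead of re-adding-then-slicing them, and finds the kept tokens by a pairwise index scan (consume a left child, emit the right, step by two; '#' emitted and stepped over) instead of A's helper with a 0/1 parity flag toggled per token.
import Mathlib
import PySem

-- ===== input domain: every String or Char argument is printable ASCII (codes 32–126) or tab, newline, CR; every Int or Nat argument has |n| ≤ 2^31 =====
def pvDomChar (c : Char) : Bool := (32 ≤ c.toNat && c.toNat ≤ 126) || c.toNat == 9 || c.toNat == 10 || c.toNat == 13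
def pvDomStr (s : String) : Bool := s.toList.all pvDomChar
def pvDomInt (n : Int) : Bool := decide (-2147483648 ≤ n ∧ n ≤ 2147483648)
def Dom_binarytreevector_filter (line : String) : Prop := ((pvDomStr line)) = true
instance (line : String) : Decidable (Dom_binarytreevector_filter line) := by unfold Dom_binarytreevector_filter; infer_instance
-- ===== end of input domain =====

-- B is a single flat function: brackets are stripped conditionally instead of being re-added
-- and re-stripped, and the kept tokens are found by a pairwise index scan instead of A's
-- per-token parity flag (objective: alternative decomposition, same cost).

-- ===== PORT A =====
-- loop body of A's binarytree_filter: parity flag toggled per non-sentinel token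
def pvA_step (st : List String × Int) (n : String) : List String × Int :=
  if n ≠ "#" then
    ((if st.2 == 1 then st.1 ++ [n] else st.1), PySem.Int.bxor st.2 1)
  else
    (st.1 ++ [n], 0)

-- helper binarytree_filter of A
def pvA_inner (line : String) : String :=
  -- split? with separator "," (nonempty) is never none
  let tree := (PySem.Str.split? (PySem.Str.slice line (some 1) (some (-1))) ",").getD []
  let st := tree.foldl pvA_step ([], 0)
  "[" ++ PySem.Str.join "," st.1 ++ "]"

def binarytreevector_filter (line : String) : String :=
  if line == "[]" then line
  else
    let trees := (PySem.Str.split? (PySem.Str.slice line (some 1) (some (-1))) "],[").getD []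
    -- the in-place elementwise update loop, as a map
    let trees := trees.map (fun t =>
      pvA_inner ((if PySem.Str.startswith t "[" then "" else "[") ++ t ++
                 (if PySem.Str.endswith t "]" then "" else "]")))
    "[" ++ PySem.Str.join "," trees ++ "]"

-- ===== PORT B =====
-- the `while i < len(ts)` pairwise scan of B, as structural recursion on the token list
def pvKeep : List String → List String
  | [] => []
  | t :: rest =>
    if t == "#" then "#" :: pvKeep rest
    else
      match rest with
      | u :: rest2 => if u != "#" then u :: pvKeep rest2 else pvKeep (u :: rest2)
      | [] => []

def binarytreevector_filter_alt (line : String) : String :=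
  if line == "[]" then line
  else
    let out := ((PySem.Str.split? (PySem.Str.slice line (some 1) (some (-1))) "],[").getD []).map
      (fun t =>
        let body := if PySem.Str.startswith t "[" then PySem.Str.slice t (some 1) none else t
        let body := if PySem.Str.endswith body "]" then PySem.Str.slice body none (some (-1)) else body
        "[" ++ PySem.Str.join "," (pvKeep ((PySem.Str.split? body ",").getD [])) ++ "]")
    "[" ++ PySem.Str.join "," out ++ "]"

-- ===== PRECONDITION & SPEC =====
def Spec_binarytreevector_filter (line : String) (out : String) : Prop := out = binarytreevector_filter_alt line
instance (line : String) (out : String) : Decidable (Spec_binarytreevector_filter line out) := by unfold Spec_binarytreevector_filter; infer_instance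

-- ===== CLAIM (what is proved, stated in full; the proofs are below) =====
def Claim_equal_binarytreevector_filter : Prop := ∀ (line : String), Dom_binarytreevector_filter line → Spec_binarytreevector_filter line (binarytreevector_filter line)

-- ===== LEMMAS AND PROOFS =====

-- xs[1:-1] as drop-then-dropLast
lemma pv_slice_one_neg_one {α : Type} (xs : List α) :
    PySem.List.slice xs (some 1) (some (-1)) = (xs.drop 1).dropLast := by
  cases xs with
  | nil => rfl
  | cons a l =>
    have h : ¬((l.length : Int) < 0) := by omega
    simp [PySem.List.slice, PySem.List.clampIdx, List.dropLast_eq_take, h]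

-- one-token suffix test is unaffected by a different leading character
lemma pv_endswith_cons (a : Char) (l : List Char) (c : Char) (hne : a ≠ c) :
    PySem.Chars.endswith (a :: l) [c] = PySem.Chars.endswith l [c] := by
  by_cases hl : [c] <:+ l
  · rw [(PySem.Chars.endswith_iff _ _).mpr (List.suffix_cons_iff.mpr (Or.inr hl)),
      (PySem.Chars.endswith_iff _ _).mpr hl]
  · have ha : PySem.Chars.endswith (a :: l) [c] = false := by
      rw [Bool.eq_false_iff]; intro hc
      rcases List.suffix_cons_iff.mp ((PySem.Chars.endswith_iff _ _).mp hc) with heq | hsuf'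
      · cases heq; exact hne rfl
      · exact hl hsuf'
    have hb : PySem.Chars.endswith l [c] = false := by
      rw [Bool.eq_false_iff]; intro hc; exact hl ((PySem.Chars.endswith_iff _ _).mp hc)
    rw [ha, hb]

-- unfolding equations for pvKeep's four reachable shapes
lemma pvKeep_sharp (rest : List String) : pvKeep ("#" :: rest) = "#" :: pvKeep rest := by
  rw [pvKeep.eq_def]; simp
lemma pvKeep_pair (t u : String) (rest2 : List String) (ht : t ≠ "#") (hu : u ≠ "#") :
    pvKeep (t :: u :: rest2) = u :: pvKeep rest2 := by
  rw [pvKeep.eq_def]; simp [ht, hu]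
lemma pvKeep_tsharp (t : String) (rest2 : List String) (ht : t ≠ "#") :
    pvKeep (t :: "#" :: rest2) = pvKeep ("#" :: rest2) := by
  rw [pvKeep.eq_def]; simp [ht]
lemma pvKeep_single (t : String) (ht : t ≠ "#") : pvKeep [t] = [] := by
  rw [pvKeep.eq_def]; simp [ht]

-- A's parity fold produces exactly B's pairwise scan
lemma pv_keep_eq (ts : List String) : ∀ acc : List String,
    (ts.foldl pvA_step (acc, 0)).1 = acc ++ pvKeep ts := by
  induction ts using pvKeep.induct with
  | case1 => intro acc; simp [pvKeep]
  | case2 t rest h ih =>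
    intro acc
    have ht : t = "#" := by simpa using h
    subst ht
    simp only [List.foldl_cons, pvA_step, pvKeep_sharp]
    simp [ih]
  | case3 t ht u rest2 hu ih =>
    intro acc
    have ht' : t ≠ "#" := by simpa using ht
    have hu' : u ≠ "#" := by simpa using hu
    have hx0 : PySem.Int.bxor 0 1 = 1 := by decide
    have hx1 : PySem.Int.bxor 1 1 = 0 := by decide
    simp only [List.foldl_cons, pvA_step, if_pos ht', if_neg (by simp : ¬((0:Int) == 1) = true), hx0,
      if_pos hu', if_pos (by simp : ((1:Int) == 1) = true), hx1]
    simp [pvKeep_pair t u rest2 ht' hu', ih]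
  | case4 t ht u rest2 hu ih =>
    intro acc
    have ht' : t ≠ "#" := by simpa using ht
    have hu' : u = "#" := by simpa using hu
    subst hu'
    have hx0 : PySem.Int.bxor 0 1 = 1 := by decide
    have h1 : (List.foldl pvA_step (acc, 0) (t :: "#" :: rest2)).1
        = (List.foldl pvA_step (acc ++ ["#"], 0) rest2).1 := by
      simp [List.foldl_cons, pvA_step, ht', hx0]
    have h2 := ih acc
    simp only [List.foldl_cons] at h2
    have h3 : pvA_step (acc, 0) "#" = (acc ++ ["#"], 0) := by simp [pvA_step]
    rw [h3] at h2
    rw [h1, h2]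
    rw [pvKeep_tsharp t rest2 ht']
  | case5 t ht =>
    intro acc
    have ht' : t ≠ "#" := by simpa using ht
    simp [List.foldl_cons, pvA_step, ht', pvKeep_single t ht']

-- the normalised body A slices out equals B's conditional strip
lemma pv_body_eq (t : String) :
    PySem.Str.slice ((if PySem.Str.startswith t "[" then "" else "[") ++ t ++
        (if PySem.Str.endswith t "]" then "" else "]")) (some 1) (some (-1)) =
      (let body := if PySem.Str.startswith t "[" then PySem.Str.slice t (some 1) none else t
       if PySem.Str.endswith body "]" then PySem.Str.slice body none (some (-1)) else body) := by
  apply String.toList_inj.mp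
  by_cases hs : PySem.Chars.startswith t.toList ['['] = true
  · obtain ⟨rest, hrest⟩ := (PySem.Chars.startswith_iff _ _).mp hs
    have hrest' : t.toList = '[' :: rest := hrest.symm
    rw [hrest'] at hs
    by_cases he : PySem.Chars.endswith t.toList [']'] = true
    · rw [hrest'] at he
      have he' : PySem.Chars.endswith rest [']'] = true := by
        rw [← pv_endswith_cons '[' rest ']' (by decide)]; exact he
      simp [hs, he, hrest', PySem.List.slice_from_one, pv_slice_one_neg_one, he',
        PySem.List.slice_to_neg_one]
    · rw [hrest'] at he
      have he' : PySem.Chars.endswith rest [']'] = false := by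
        rw [Bool.eq_false_iff]; intro hcon
        exact he (by rw [pv_endswith_cons '[' rest ']' (by decide)]; exact hcon)
      simp [hs, he, hrest', PySem.List.slice_from_one, pv_slice_one_neg_one, he']
  · by_cases he : PySem.Chars.endswith t.toList [']'] = true
    · simp [hs, he, pv_slice_one_neg_one, PySem.List.slice_to_neg_one]
    · simp [hs, he, pv_slice_one_neg_one]

lemma pv_elem_eq (t : String) :
    pvA_inner ((if PySem.Str.startswith t "[" then "" else "[") ++ t ++
        (if PySem.Str.endswith t "]" then "" else "]")) =
      (let body := if PySem.Str.startswith t "[" then PySem.Str.slice t (some 1) none else t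
       let body := if PySem.Str.endswith body "]" then PySem.Str.slice body none (some (-1)) else body
       "[" ++ PySem.Str.join "," (pvKeep ((PySem.Str.split? body ",").getD [])) ++ "]") := by
  unfold pvA_inner
  rw [pv_body_eq]
  simp [pv_keep_eq]

-- ===== VERDICT (by name: the statement is the Claim_ definition above) =====
theorem binarytreevector_filter_spec : Claim_equal_binarytreevector_filter := by
  intro line _
  unfold Spec_binarytreevector_filter binarytreevector_filter binarytreevector_filter_alt
  rw [funext pv_elem_eq]
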